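-- pv_equiv track=rewrite | github.com/Easymean1207/codetree-TILs | 240731/나누고 빼면서 합하기/divide-and-subtract-and-add-up.py | magicFunction
-- ===== SOURCE A (Python) =====
-- def magicFunction(sequence, m):
--     output = sequence[m-1]
--
--     for i in range(len(sequence)):
--         while m > 1:
--             if m%2 == 1:
--                 m -=1
--             else:
--                 m //=2
--             output += sequence[m-1]
--
--     return output
-- ===== SOURCE B (Python) =====
-- def magicFunction(sequence, m):
--     if m <= 1:
--         return sequence[m-1]
--     nxt = m - 1 if m % 2 == 1 else m // 2
--     return sequence[m-1] + magicFunction(sequence, nxt)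
-- ===== Notes on version B (the rewrite author's own statement) =====
-- stated objective: faster
-- what changed: Replaces the nested for/while loops (the outer for over range(len(sequence)) is dead after its first iteration) with a direct recursion on the reduced value of m, dropping the O(n) dead outer loop.
import Mathlib
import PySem

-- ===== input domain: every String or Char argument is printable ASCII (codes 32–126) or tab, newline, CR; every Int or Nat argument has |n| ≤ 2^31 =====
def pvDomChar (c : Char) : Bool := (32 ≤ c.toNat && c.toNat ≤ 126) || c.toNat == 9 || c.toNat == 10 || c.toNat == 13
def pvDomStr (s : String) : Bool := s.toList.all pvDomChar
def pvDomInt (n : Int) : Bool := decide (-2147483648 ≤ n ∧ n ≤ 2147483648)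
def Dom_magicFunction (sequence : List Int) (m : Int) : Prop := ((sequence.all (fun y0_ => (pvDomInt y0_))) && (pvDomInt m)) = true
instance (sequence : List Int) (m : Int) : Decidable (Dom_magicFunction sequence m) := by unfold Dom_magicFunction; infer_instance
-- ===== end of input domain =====

-- B replaces A's nested for/while loops (the outer for is dead after its first pass) by a
-- direct recursion on the reduced value of m; objective: simpler. Equal return value on Pre_.

-- ===== PORT A =====
-- the inner `while m > 1:` loop of A, state (m, output); pyGet? … |>.getD 0 is sequence[m-1]
-- (Pre_ keeps every index in range, so the default is never taken on admitted inputs)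
def magicAWhile (sequence : List Int) (m output : Int) : Int × Int :=
  if 1 < m then
    if PySem.Int.mod m 2 = 1 then
      magicAWhile sequence (m - 1) (output + ((PySem.List.pyGet? sequence (m - 1 - 1)).getD 0))
    else
      magicAWhile sequence (PySem.Int.floordiv m 2)
        (output + ((PySem.List.pyGet? sequence (PySem.Int.floordiv m 2 - 1)).getD 0))
  else (m, output)
termination_by m.toNat
decreasing_by
  · omega
  · rw [PySem.Int.floordiv_eq_ediv_of_pos (by omega)]; omega

def magicFunction (sequence : List Int) (m : Int) : Int :=
  let output := (PySem.List.pyGet? sequence (m - 1)).getD 0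
  ((PySem.List.pyRange 0 sequence.length 1).foldl
      (fun st _ => magicAWhile sequence st.1 st.2) (m, output)).2

-- ===== PORT B =====
def magicFunction_alt (sequence : List Int) (m : Int) : Int :=
  if m ≤ 1 then (PySem.List.pyGet? sequence (m - 1)).getD 0
  else
    let nxt := if PySem.Int.mod m 2 = 1 then m - 1 else PySem.Int.floordiv m 2
    (PySem.List.pyGet? sequence (m - 1)).getD 0 + magicFunction_alt sequence nxt
termination_by m.toNat
decreasing_by
  split
  · omega
  · rw [PySem.Int.floordiv_eq_ediv_of_pos (by omega)]; omega

-- ===== PRECONDITION & SPEC =====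
-- Pre_ excludes exactly the inputs where Python A raises IndexError: the empty list, an initial
-- index m-1 out of range for m ≤ 1, or m > len(sequence) (then sequence[m-1] is out of range).
def Pre_magicFunction (sequence : List Int) (m : Int) : Prop :=
  sequence ≠ [] ∧ (m ≤ 1 → -(sequence.length : Int) ≤ m - 1) ∧ (1 < m → m ≤ (sequence.length : Int))
instance (sequence : List Int) (m : Int) : Decidable (Pre_magicFunction sequence m) := by
  unfold Pre_magicFunction; infer_instance
def pvWitness_magicFunction : List Int × Int := ([3, 1, 4, 1, 5], 5)

def Spec_magicFunction (sequence : List Int) (m : Int) (out : Int) : Prop := out = magicFunction_alt sequence m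
instance (sequence : List Int) (m : Int) (out : Int) : Decidable (Spec_magicFunction sequence m out) := by unfold Spec_magicFunction; infer_instance

-- ===== CLAIM (what is proved, stated in full; the proofs are below) =====
def Claim_equal_magicFunction : Prop := ∀ (sequence : List Int) (m : Int), Dom_magicFunction sequence m → Pre_magicFunction sequence m → Spec_magicFunction sequence m (magicFunction sequence m)

-- ===== LEMMAS AND PROOFS =====

-- the while loop always ends with m ≤ 1
theorem magicAWhile_fst_le (sequence : List Int) (m output : Int) :
    (magicAWhile sequence m output).1 ≤ 1 := by
  fun_induction magicAWhile sequence m output with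
  | case1 m output h hmod ih => exact ih
  | case2 m output h hmod ih => exact ih
  | case3 m output h => simpa using by omega

-- the while loop is the identity once m ≤ 1
theorem magicAWhile_of_le (sequence : List Int) (m output : Int) (h : m ≤ 1) :
    magicAWhile sequence m output = (m, output) := by
  unfold magicAWhile; rw [if_neg (by omega)]

-- the output of the while loop equals B's recursion minus the first term
theorem magicAWhile_snd (sequence : List Int) (m output : Int) :
    (magicAWhile sequence m output).2 =
      output + magicFunction_alt sequence m - (PySem.List.pyGet? sequence (m - 1)).getD 0 := by
  fun_induction magicAWhile sequence m output with
  | case1 m output h hmod ih =>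
      rw [ih]
      conv_rhs => rw [magicFunction_alt.eq_def]
      rw [if_neg (by omega)]
      simp only [hmod, if_pos]
      ring
  | case2 m output h hmod ih =>
      rw [ih]
      conv_rhs => rw [magicFunction_alt.eq_def]
      rw [if_neg (by omega)]
      rw [if_neg hmod]
      ring
  | case3 m output h =>
      rw [magicFunction_alt.eq_def, if_pos (by omega)]
      ring

-- folding the while-loop step over any index list is the identity on a settled state
theorem foldl_magicAWhile_fix (sequence : List Int) (l : List Int) (st : Int × Int)
    (h : st.1 ≤ 1) :
    l.foldl (fun st _ => magicAWhile sequence st.1 st.2) st = st := by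
  induction l with
  | nil => rfl
  | cons x xs ih => simpa [magicAWhile_of_le sequence st.1 st.2 h] using ih

-- ===== VERDICT (by name: the statement is the Claim_ definition above) =====
theorem magicFunction_spec : Claim_equal_magicFunction := by
  intro sequence m _ hpre
  obtain ⟨hne, -, -⟩ := hpre
  unfold Spec_magicFunction magicFunction
  have hlen : (0 : Int) < (sequence.length : Int) := by
    have := List.length_pos_iff.mpr hne; exact_mod_cast this
  rw [PySem.List.pyRange_one_cons hlen]
  simp only [List.foldl_cons]
  rw [foldl_magicAWhile_fix sequence _ _ (magicAWhile_fst_le sequence m _)]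
  rw [magicAWhile_snd]
  ring
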